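-- pv_equiv track=rewrite | github.com/ross3102/Advent | advent2016/advent7.py | is_aba
-- ===== SOURCE A (Python) =====
-- def is_aba(string):
--     in_brackets = False
--     outside = []
--     inside = []
--     for char in range(len(string) - 3):
--         if string[char] == "[":
--             in_brackets = True
--         a = string[char]
--         b = string[char+1]
--         if string[char+2] == a and b != a:
--             if in_brackets:
--                 inside.append([b,a,b])
--             else:
--                 outside.append([a,b,a])
--         if string[char] == "]":
--             in_brackets = False
--     for x in outside:
--         for y in inside:
--             if x == y:
--                 return True
--     return False
-- ===== SOURCE B (Python) =====
-- def is_aba(string):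
--     n = len(string)
--     # Pass 1: collect the triples recorded inside brackets, as normalized pairs.
--     inside = set()
--     in_b = False
--     for i in range(n - 3):
--         c = string[i]
--         if c == '[':
--             in_b = True
--         if in_b and string[i + 2] == c and string[i + 1] != c:
--             inside.add((string[i + 1], c))
--         if c == ']':
--             in_b = False
--     # Pass 2: scan again for outside triples, answering as soon as one matches.
--     in_b = False
--     for i in range(n - 3):
--         c = string[i]
--         if c == '[':
--             in_b = True
--         if (not in_b) and string[i + 2] == c and string[i + 1] != c \
--                 and (c, string[i + 1]) in inside:
--             return True
--         if c == ']':
--             in_b = False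
--     return False
-- ===== Notes on version B (the rewrite author's own statement) =====
-- stated objective: alternative
-- what changed: A makes one scan that collects BOTH triple lists and then compares every outside triple with every inside triple in a nested loop; B is a staged two-pass search: a first pass builds only a set of normalized inside pairs, and a second pass returns True the moment an outside triple's pair is found in that set, so the outside collection and the nested comparison disappear.
import Mathlib
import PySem

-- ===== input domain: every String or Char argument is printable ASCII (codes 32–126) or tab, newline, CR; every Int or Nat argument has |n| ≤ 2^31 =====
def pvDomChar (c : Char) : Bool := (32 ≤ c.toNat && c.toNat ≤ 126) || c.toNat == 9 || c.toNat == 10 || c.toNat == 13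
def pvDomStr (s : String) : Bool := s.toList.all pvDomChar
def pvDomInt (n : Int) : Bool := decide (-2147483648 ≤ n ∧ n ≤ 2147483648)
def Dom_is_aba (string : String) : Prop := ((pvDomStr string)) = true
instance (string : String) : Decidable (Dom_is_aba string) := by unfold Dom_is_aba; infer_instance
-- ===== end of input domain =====

-- B replaces A's collect-both-lists-then-nested-compare by a staged two-pass search:
-- pass 1 builds a set of inside pairs, pass 2 answers on the first matching outside triple (alternative algorithm).

-- ===== PORT A =====
-- one iteration of A's scanning loop (state: in_brackets, outside, inside)
def abaStepA (s : List Char) (st : Bool × List (List Char) × List (List Char)) (i : Int) :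
    Bool × List (List Char) × List (List Char) :=
  let inb := if PySem.List.pyGetD s i ' ' == '[' then true else st.1
  let a := PySem.List.pyGetD s i ' '
  let b := PySem.List.pyGetD s (i+1) ' '
  let oi :=
    if PySem.List.pyGetD s (i+2) ' ' == a && !(b == a) then
      if inb then (st.2.1, st.2.2 ++ [[b, a, b]]) else (st.2.1 ++ [[a, b, a]], st.2.2)
    else (st.2.1, st.2.2)
  let inb := if PySem.List.pyGetD s i ' ' == ']' then false else inb
  (inb, oi)

def is_aba (string : String) : Bool :=
  let s := string.toList
  let st := (PySem.List.pyRange 0 ((s.length : Int) - 3) 1).foldl (abaStepA s) (false, [], [])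
  -- the nested 'for x in outside: for y in inside: if x == y: return True' / 'return False'
  st.2.1.any (fun x => st.2.2.any (fun y => x == y))

-- ===== PORT B =====
-- pass 1: one iteration collecting inside pairs (state: in_b, inside set)
def abaStep1 (s : List Char) (st : Bool × PySem.Set (Char × Char)) (i : Int) :
    Bool × PySem.Set (Char × Char) :=
  let c := PySem.List.pyGetD s i ' '
  let inb := if c == '[' then true else st.1
  let ins :=
    if inb && (PySem.List.pyGetD s (i+2) ' ' == c) && !(PySem.List.pyGetD s (i+1) ' ' == c) then
      PySem.Set.add st.2 (PySem.List.pyGetD s (i+1) ' ', c)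
    else st.2
  ((if c == ']' then false else inb), ins)

-- pass 2: one iteration; the early 'return True' becomes a sticky found-flag (state: in_b, found)
def abaStep2 (s : List Char) (S : PySem.Set (Char × Char)) (st : Bool × Bool) (i : Int) :
    Bool × Bool :=
  let c := PySem.List.pyGetD s i ' '
  let inb := if c == '[' then true else st.1
  let found := st.2 ||
    (!inb && (PySem.List.pyGetD s (i+2) ' ' == c) && !(PySem.List.pyGetD s (i+1) ' ' == c)
      && PySem.Set.contains S (c, PySem.List.pyGetD s (i+1) ' '))
  ((if c == ']' then false else inb), found)

def is_aba_alt (string : String) : Bool :=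
  let s := string.toList
  let r := PySem.List.pyRange 0 ((s.length : Int) - 3) 1
  let S := (r.foldl (abaStep1 s) (false, PySem.Set.empty)).2
  (r.foldl (abaStep2 s S) (false, false)).2

-- ===== PRECONDITION & SPEC =====
def Spec_is_aba (string : String) (out : Bool) : Prop := out = is_aba_alt string
instance (string : String) (out : Bool) : Decidable (Spec_is_aba string out) := by unfold Spec_is_aba; infer_instance

-- ===== CLAIM =====
def Claim_equal_is_aba : Prop := ∀ (string : String), Dom_is_aba string → Spec_is_aba string (is_aba string)

-- ===== LEMMAS AND PROOFS =====

lemma pair_triple_inj (p : Char × Char) (a b : Char) :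
    [p.1, p.2, p.1] = [a, b, a] ↔ p = (a, b) := by
  constructor
  · intro h
    injection h with e1 h
    injection h with e2 _
    exact Prod.ext e1 e2
  · rintro rfl; rfl

/-- Invariant relating A's state to B's pass-1 state: same flag; the set holds exactly the
normalized pairs of A's inside list; every element of A's inside list is such a triple. -/
def Rel1 (sa : Bool × List (List Char) × List (List Char))
    (sb : Bool × PySem.Set (Char × Char)) : Prop :=
  sa.1 = sb.1
  ∧ (∀ p : Char × Char, p ∈ sb.2 ↔ [p.1, p.2, p.1] ∈ sa.2.2)
  ∧ (∀ x ∈ sa.2.2, ∃ p : Char × Char, x = [p.1, p.2, p.1])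

lemma abaStep_rel1 (s : List Char) (i : Int) (sa sb) (h : Rel1 sa sb) :
    Rel1 (abaStepA s sa i) (abaStep1 s sb i) := by
  obtain ⟨h1, h2, h3⟩ := h
  unfold Rel1
  simp only [abaStepA, abaStep1, h1]
  cases hbr : (PySem.List.pyGetD s i ' ' == '[') <;>
  cases hdc : (PySem.List.pyGetD s (i+2) ' ' == PySem.List.pyGetD s i ' ') <;>
  cases hbc : (PySem.List.pyGetD s (i+1) ' ' == PySem.List.pyGetD s i ' ') <;>
  (try cases hin : sb.1) <;>
  simp only [Bool.false_eq_true, Bool.true_eq_false, if_true, if_false,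
    Bool.false_and, Bool.true_and, Bool.and_false, Bool.and_true,
    Bool.not_true, Bool.not_false, Bool.or_false, Bool.false_or, reduceIte] <;>
  refine ⟨?_, ?_, ?_⟩ <;>
    first
      | rfl
      | (simp; done)
      | exact h2
      | exact h3
      | (intro x hx
         rcases List.mem_append.1 hx with hx | hx
         · exact h3 x hx
         · rw [List.mem_singleton.1 hx]; exact ⟨(_, _), rfl⟩)
      | (intro p
         simp only [PySem.Set.mem_add, List.mem_append, List.mem_singleton,
           pair_triple_inj, h2])
      | (intro a b; exact h2 (a, b))
      | (intro x hx; obtain ⟨p, hp⟩ := h3 x hx; exact ⟨p.1, p.2, by rw [hp]⟩)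
      | (simp_all; done)

lemma abaFold_rel1 (s : List Char) (l : List Int) (sa sb) (h : Rel1 sa sb) :
    Rel1 (l.foldl (abaStepA s) sa) (l.foldl (abaStep1 s) sb) := by
  induction l generalizing sa sb with
  | nil => exact h
  | cons i t ih => exact ih _ _ (abaStep_rel1 s i sa sb h)

/-- Invariant relating A's state to B's pass-2 state: same flag; the found-flag says
"some outside triple recorded so far has its pair in S". -/
def Rel2 (S : PySem.Set (Char × Char)) (sa : Bool × List (List Char) × List (List Char))
    (sb : Bool × Bool) : Prop :=
  sa.1 = sb.1
  ∧ (sb.2 = true ↔ ∃ p : Char × Char, [p.1, p.2, p.1] ∈ sa.2.1 ∧ p ∈ S)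
  ∧ (∀ x ∈ sa.2.1, ∃ p : Char × Char, x = [p.1, p.2, p.1])

lemma abaStep_rel2 (s : List Char) (S : PySem.Set (Char × Char)) (i : Int) (sa sb)
    (h : Rel2 S sa sb) : Rel2 S (abaStepA s sa i) (abaStep2 s S sb i) := by
  obtain ⟨h1, h2, h3⟩ := h
  unfold Rel2
  simp only [abaStepA, abaStep2, h1]
  cases hbr : (PySem.List.pyGetD s i ' ' == '[') <;>
  cases hdc : (PySem.List.pyGetD s (i+2) ' ' == PySem.List.pyGetD s i ' ') <;>
  cases hbc : (PySem.List.pyGetD s (i+1) ' ' == PySem.List.pyGetD s i ' ') <;>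
  (try cases hin : sb.1) <;>
  simp only [Bool.false_eq_true, Bool.true_eq_false, if_true, if_false,
    Bool.false_and, Bool.true_and, Bool.and_false, Bool.and_true,
    Bool.not_true, Bool.not_false, Bool.or_false, Bool.false_or, reduceIte] <;>
  refine ⟨?_, ?_, ?_⟩ <;>
    first
      | rfl
      | (simp; done)
      | (simp only [Bool.not_true, Bool.not_false, Bool.false_and, Bool.and_false,
          Bool.true_and, Bool.and_true, Bool.or_false]
         exact h2)
      | exact h3
      | (intro x hx
         rcases List.mem_append.1 hx with hx | hx
         · exact h3 x hx
         · rw [List.mem_singleton.1 hx]; exact ⟨(_, _), rfl⟩)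
      | -- the branch where A records an outside triple and B tests membership in S
        (simp only [Bool.not_true, Bool.not_false, Bool.false_and, Bool.and_false,
           Bool.true_and, Bool.and_true, Bool.or_false, Bool.or_eq_true,
           PySem.Set.contains, List.contains_eq_mem, decide_eq_true_eq,
           List.mem_append, List.mem_singleton]
         constructor
         · rintro (hf | hf)
           · obtain ⟨p, hp, hpS⟩ := h2.1 hf
             exact ⟨p, Or.inl hp, hpS⟩
           · exact ⟨(_, _), Or.inr rfl, hf⟩
         · rintro ⟨p, hp | hp, hpS⟩
           · exact Or.inl (h2.2 ⟨p, hp, hpS⟩)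
           · rw [pair_triple_inj] at hp
             subst hp
             exact Or.inr hpS)
      | (intro a b; exact h2 (a, b))
      | (intro x hx; obtain ⟨p, hp⟩ := h3 x hx; exact ⟨p.1, p.2, by rw [hp]⟩)
      | (simp_all; done)

lemma abaFold_rel2 (s : List Char) (S : PySem.Set (Char × Char)) (l : List Int) (sa sb)
    (h : Rel2 S sa sb) :
    Rel2 S (l.foldl (abaStepA s) sa) (l.foldl (abaStep2 s S) sb) := by
  induction l generalizing sa sb with
  | nil => exact h
  | cons i t ih => exact ih _ _ (abaStep_rel2 s S i sa sb h)

-- ===== VERDICT =====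
theorem is_aba_spec : Claim_equal_is_aba := by
  intro string _
  unfold Spec_is_aba is_aba is_aba_alt
  set s := string.toList with hs
  set r := PySem.List.pyRange 0 ((s.length : Int) - 3) 1 with hr
  set stA := r.foldl (abaStepA s) (false, [], []) with hstA
  set S := (r.foldl (abaStep1 s) (false, PySem.Set.empty)).2 with hS
  have r1 := abaFold_rel1 s r (false, [], []) (false, PySem.Set.empty)
      (by exact ⟨rfl, by simp [PySem.Set.empty], by simp⟩)
  have r2 := abaFold_rel2 s S r (false, [], []) (false, false)
      (by exact ⟨rfl, by simp, by simp⟩)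
  rw [← hstA] at r1 r2
  obtain ⟨-, h2, -⟩ := r1
  obtain ⟨-, g2, g3⟩ := r2
  rw [Bool.eq_iff_iff]
  simp only [List.any_eq_true, beq_iff_eq]
  rw [g2]
  constructor
  · rintro ⟨x, hxo, y, hyi, rfl⟩
    obtain ⟨p, rfl⟩ := g3 x hxo
    exact ⟨p, hxo, (h2 p).2 hyi⟩
  · rintro ⟨p, hpo, hpS⟩
    exact ⟨[p.1, p.2, p.1], hpo, [p.1, p.2, p.1], (h2 p).1 hpS, rfl⟩
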